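-- pv_equiv track=rewrite | github.com/aryalsushant/dsa | tip101-3a/7 - Recursion/session1/in_the_stars.py | non_recursive
-- ===== SOURCE A (Python) =====
-- def non_recursive(s):
--     if len(s) <= 1:
--         return s
--     else:
--         lst = []
--         for char in s:
--             lst.append(char)
--
--
--         return "*".join(lst)
-- ===== SOURCE B (Python) =====
-- def non_recursive(s):
--     if len(s) <= 1:
--         return s
--     m = len(s) // 2
--     return non_recursive(s[:m]) + "*" + non_recursive(s[m:])
-- ===== Notes on version B (the rewrite author's own statement) =====
-- stated objective: alternative
-- what changed: Replaces A's build-a-char-list-then-join pass with a divide-and-conquer recursion that splits the string in half and joins the two separated halves with a single asterisk.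
import Mathlib
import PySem

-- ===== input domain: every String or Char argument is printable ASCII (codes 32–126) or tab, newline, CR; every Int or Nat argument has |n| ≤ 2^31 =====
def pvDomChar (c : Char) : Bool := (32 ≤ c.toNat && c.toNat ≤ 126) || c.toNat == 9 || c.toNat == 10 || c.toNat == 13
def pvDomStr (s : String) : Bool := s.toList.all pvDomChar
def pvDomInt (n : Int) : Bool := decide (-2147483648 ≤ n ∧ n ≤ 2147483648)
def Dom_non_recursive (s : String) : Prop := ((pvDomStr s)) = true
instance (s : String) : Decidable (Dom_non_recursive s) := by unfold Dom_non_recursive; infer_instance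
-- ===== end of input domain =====

-- B replaces A's build-a-char-list-then-join pass with a divide-and-conquer recursion on string halves (alternative algorithm, not claimed faster).


-- ===== PORT A =====
-- lst = []; for char in s: lst.append(char)  — lst becomes the list of one-character strings, then "*".join(lst)
def non_recursive (s : String) : String :=
  if s.toList.length ≤ 1 then s
  else
    let lst := s.toList.foldl (fun acc c => acc ++ [[c]]) ([] : List (List Char))
    String.ofList (PySem.Chars.join ['*'] lst)

-- ===== PORT B =====
-- if len(s) <= 1: return s  else: m = len(s)//2; return non_recursive(s[:m]) + "*" + non_recursive(s[m:])
def nrAltGo (cs : List Char) : List Char :=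
  if cs.length ≤ 1 then cs
  else
    let m := cs.length / 2
    nrAltGo (PySem.List.slice cs none (some (m : Int))) ++ '*' :: nrAltGo (PySem.List.slice cs (some (m : Int)) none)
termination_by cs.length
decreasing_by
  · simp only [PySem.List.slice_to_natCast, List.length_take]; omega
  · simp only [PySem.List.slice_from_natCast, List.length_drop]; omega

def non_recursive_alt (s : String) : String := String.ofList (nrAltGo s.toList)

-- ===== PRECONDITION & SPEC =====
def Spec_non_recursive (s : String) (out : String) : Prop := out = non_recursive_alt s
instance (s : String) (out : String) : Decidable (Spec_non_recursive s out) := by unfold Spec_non_recursive; infer_instance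

-- ===== CLAIM (what is proved, stated in full; the proofs are below) =====
def Claim_equal_non_recursive : Prop := ∀ (s : String), Dom_non_recursive s → Spec_non_recursive s (non_recursive s)

-- ===== LEMMAS AND PROOFS =====
-- sepGo is the proof-side characterisation: the chars interleaved with '*'
def sepGo : List Char → List Char
  | [] => []
  | [c] => [c]
  | c :: rest => c :: '*' :: sepGo rest

theorem nr_foldl_append (cs : List Char) (acc : List (List Char)) :
    cs.foldl (fun acc c => acc ++ [[c]]) acc = acc ++ cs.map ([·]) := by
  induction cs generalizing acc with
  | nil => simp [List.foldl]
  | cons c t ih => simp [List.foldl, ih]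

theorem nr_join_eq_sepGo (cs : List Char) :
    PySem.Chars.join ['*'] (cs.map ([·])) = sepGo cs := by
  induction cs with
  | nil => simp [sepGo, PySem.Chars.join_nil]
  | cons c t ih =>
    cases t with
    | nil => simp [sepGo, PySem.Chars.join_singleton]
    | cons d u =>
      simp only [List.map, PySem.Chars.join_cons_cons, sepGo] at *
      simp [ih]

theorem sepGo_append (a b : List Char) (ha : a ≠ []) (hb : b ≠ []) :
    sepGo (a ++ b) = sepGo a ++ '*' :: sepGo b := by
  induction a with
  | nil => exact absurd rfl ha
  | cons c a' ih =>
    cases a' with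
    | nil =>
      cases b with
      | nil => exact absurd rfl hb
      | cons d b' => simp [sepGo]
    | cons e a'' =>
      simp only [List.cons_append, sepGo]
      rw [← List.cons_append, ih (by simp)]

theorem nrAltGo_eq_sepGo (cs : List Char) : nrAltGo cs = sepGo cs := by
  induction hn : cs.length using Nat.strong_induction_on generalizing cs with
  | _ n ih =>
    subst hn
    unfold nrAltGo
    by_cases h : cs.length ≤ 1
    · rw [if_pos h]
      match cs, h with
      | [], _ => rfl
      | [c], _ => rfl
    · rw [if_neg h]
      have h2 : 2 ≤ cs.length := by omega
      simp only [PySem.List.slice_to_natCast, PySem.List.slice_from_natCast]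
      rw [ih _ (by simp [List.length_take]; omega) _ rfl,
          ih _ (by simp [List.length_drop]; omega) _ rfl,
          ← sepGo_append _ _
            (by apply List.ne_nil_of_length_pos; simp [List.length_take]; omega)
            (by apply List.ne_nil_of_length_pos; simp [List.length_drop]; omega),
          List.take_append_drop]

-- ===== VERDICT (by name: the statement is the Claim_ definition above) =====
theorem non_recursive_spec : Claim_equal_non_recursive := by
  intro s _
  unfold Spec_non_recursive non_recursive non_recursive_alt
  rw [nrAltGo_eq_sepGo]
  by_cases h : s.toList.length ≤ 1
  · have hgo : sepGo s.toList = s.toList := by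
      match s.toList, h with
      | [], _ => rfl
      | [c], _ => rfl
    rw [if_pos h, hgo]
    exact String.ofList_toList.symm
  · rw [if_neg h]
    simp only [nr_foldl_append, List.nil_append, nr_join_eq_sepGo]
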